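-- pv_equiv track=rewrite | github.com/SovietDoge47/CSC_350_Memory_Allocation | main.py | Combine_Mem
-- ===== SOURCE A (Python) =====
-- def Combine_Mem(mem):
--     allocatedOrFree = []
--     for i in range(0, len(mem)):
--         if mem[i] != 0:
--             allocatedOrFree.append([mem[i], i])
--     for i in range(len(allocatedOrFree)-2, -1, -1):
--         if allocatedOrFree[i+1][0] < 0 and allocatedOrFree[i][0] < 0:
--             mem[allocatedOrFree[i][1]] = allocatedOrFree[i][0] + allocatedOrFree[i+1][0]
--             allocatedOrFree[i][0] = allocatedOrFree[i][0] + allocatedOrFree[i + 1][0]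
--             mem[allocatedOrFree[i+1][1]] = 0
--     return mem
-- ===== SOURCE B (Python) =====
-- def Combine_Mem(mem):
--     # Single forward pass with a pending free-block accumulator; builds a new
--     # list instead of mutating mem in place (A mutates its argument; B does not:
--     # the equivalence is about the return value).
--     out = []
--     pending = None  # (sum of the open run of free blocks, zeros buffered after its leader)
--     for x in mem:
--         if pending is None:
--             if x < 0:
--                 pending = (x, 0)
--             else:
--                 out.append(x)
--         else:
--             s, k = pending
--             if x < 0:
--                 pending = (s + x, k + 1)
--             elif x == 0:
--                 pending = (s, k + 1)
--             else:
--                 out.append(s)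
--                 out.extend([0] * k)
--                 out.append(x)
--                 pending = None
--     if pending is not None:
--         s, k = pending
--         out.append(s)
--         out.extend([0] * k)
--     return out
-- ===== Notes on version B (the rewrite author's own statement) =====
-- stated objective: simpler
-- what changed: A builds an auxiliary [value,index] list of nonzero cells and then merges adjacent negative entries in a backward pass with in-place index writes; B is a single forward pass keeping one pending (sum, buffered-zeros) accumulator for the open run of free blocks and emits the output list directly (B returns a fresh list and does not mutate mem in place as A does; the return values agree).
import Mathlib
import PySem

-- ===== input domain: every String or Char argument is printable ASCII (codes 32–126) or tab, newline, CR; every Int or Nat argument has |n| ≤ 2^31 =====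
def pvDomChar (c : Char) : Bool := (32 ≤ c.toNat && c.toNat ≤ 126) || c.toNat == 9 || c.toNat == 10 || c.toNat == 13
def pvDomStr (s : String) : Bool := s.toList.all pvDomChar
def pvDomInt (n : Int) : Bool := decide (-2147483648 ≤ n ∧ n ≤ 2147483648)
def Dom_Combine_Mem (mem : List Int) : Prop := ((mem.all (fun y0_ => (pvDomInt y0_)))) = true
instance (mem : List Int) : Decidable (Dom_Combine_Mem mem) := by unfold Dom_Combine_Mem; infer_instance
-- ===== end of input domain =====

-- B replaces A's [value,index] list + backward in-place merge by one forward pass with a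
-- pending (sum, zeros) accumulator; simpler, same cost. A mutates mem in place, B builds a
-- fresh list: the equivalence proved here is about the return value only.

-- ===== PORT A =====
-- one backward-loop iteration of A: reads pairs i and i+1, merges adjacent negatives
def stepA (st : List Int × List (Int × Nat)) (i : Nat) : List Int × List (Int × Nat) :=
  let p := st.2.getD i (0, 0)
  let q := st.2.getD (i + 1) (0, 0)
  if q.1 < 0 ∧ p.1 < 0 then
    (((st.1.set p.2 (p.1 + q.1)).set q.2 0), st.2.set i (p.1 + q.1, p.2))
  else st

def Combine_Mem (mem : List Int) : List Int :=
  let aof := (List.range mem.length).foldl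
    (fun acc i => if mem.getD i 0 ≠ 0 then acc ++ [(mem.getD i 0, i)] else acc)
    ([] : List (Int × Nat))
  (((List.range (aof.length - 1)).reverse).foldl stepA (mem, aof)).1

-- ===== PORT B =====
-- one forward step of B's loop: state = (out, pending open free-block run (sum, zeros))
def stepB (st : List Int × Option (Int × Nat)) (x : Int) : List Int × Option (Int × Nat) :=
  match st.2 with
  | none => if x < 0 then (st.1, some (x, 0)) else (st.1 ++ [x], none)
  | some (s, k) =>
      if x < 0 then (st.1, some (s + x, k + 1))
      else if x = 0 then (st.1, some (s, k + 1))
      else (st.1 ++ [s] ++ List.replicate k 0 ++ [x], none)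

def Combine_Mem_alt (mem : List Int) : List Int :=
  let st := mem.foldl stepB ([], none)
  match st.2 with
  | none => st.1
  | some (s, k) => st.1 ++ [s] ++ List.replicate k 0

-- ===== PRECONDITION & SPEC =====
def Spec_Combine_Mem (mem : List Int) (out : List Int) : Prop := out = Combine_Mem_alt mem
instance (mem : List Int) (out : List Int) : Decidable (Spec_Combine_Mem mem out) := by unfold Spec_Combine_Mem; infer_instance

-- ===== CLAIM (what is proved, stated in full; the proofs are below) =====
def Claim_equal_Combine_Mem : Prop := ∀ (mem : List Int), Dom_Combine_Mem mem → Spec_Combine_Mem mem (Combine_Mem mem)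

-- ===== LEMMAS AND PROOFS =====

-- pair indices shifted by one (cons on the memory side)
def shiftP (a : List (Int × Nat)) : List (Int × Nat) := a.map (fun p => (p.1, p.2 + 1))

-- the (value, index) pairs of the nonzero cells, structurally
def pairsOf : List Int → List (Int × Nat)
  | [] => []
  | x :: xs => if x ≠ 0 then (x, 0) :: shiftP (pairsOf xs) else shiftP (pairsOf xs)

-- A's backward loop as a structural recursion on the pairs list
def goA : List Int → List (Int × Nat) → List Int × List (Int × Nat)
  | m, [] => (m, [])
  | m, p :: rest =>
    let r := goA m rest
    let q := r.2.headD (0, 0)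
    if q.1 < 0 ∧ p.1 < 0 then
      (((r.1.set p.2 (p.1 + q.1)).set q.2 0), (p.1 + q.1, p.2) :: r.2)
    else (r.1, p :: r.2)

-- middle spec: eatA consumes an open run of free blocks, mergeMainA the main scan
mutual
def eatA : List Int → Int → Int × List Int
  | [], s => (s, [])
  | x :: xs, s =>
    if 0 < x then (s, x :: mergeMainA xs)
    else if x < 0 then
      let r := eatA xs (s + x); (r.1, 0 :: r.2)
    else
      let r := eatA xs s; (r.1, 0 :: r.2)
def mergeMainA : List Int → List Int
  | [] => []
  | x :: xs => if x < 0 then let r := eatA xs x; r.1 :: r.2 else x :: mergeMainA xs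
end

def finalizeB (st : List Int × Option (Int × Nat)) : List Int :=
  match st.2 with
  | none => st.1
  | some (s, k) => st.1 ++ [s] ++ List.replicate k 0

-- ------ A side ------

lemma getD_zero_headD (l : List (Int × Nat)) : l.getD 0 (0,0) = l.headD (0,0) := by
  cases l <;> rfl

lemma foldl_stepA_shift (L : List Nat) :
    ∀ (m : List Int) (a : List (Int × Nat)) (p : Int × Nat),
      (L.map Nat.succ).foldl stepA (m, p :: a) =
        (((L.foldl stepA (m, a)).1), p :: (L.foldl stepA (m, a)).2) := by
  induction L with
  | nil => intro m a p; rfl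
  | cons i L ih =>
    intro m a p
    have hstep : stepA (m, p :: a) (Nat.succ i) =
        (((stepA (m, a) i).1), p :: (stepA (m, a) i).2) := by
      simp only [stepA, List.getD_cons_succ, List.set_cons_succ]
      split <;> rfl
    simp only [List.map_cons, List.foldl_cons, hstep]
    exact ih _ _ _

lemma loop_eq_goA : ∀ (a : List (Int × Nat)) (m : List Int),
    ((List.range (a.length - 1)).reverse).foldl stepA (m, a) = goA m a := by
  intro a
  induction a with
  | nil => intro m; rfl
  | cons p rest ih =>
    intro m
    cases rest with
    | nil => simp [goA]
    | cons q0 rest2 =>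
      have hlen : (p :: q0 :: rest2 : List (Int × Nat)).length - 1 = rest2.length + 1 := by
        simp
      rw [hlen, List.range_succ_eq_map, List.reverse_cons']
      rw [List.concat_eq_append, List.foldl_append, List.foldl_cons, List.foldl_nil]
      rw [← List.map_reverse, foldl_stepA_shift]
      have hrest : ((List.range ((q0 :: rest2 : List (Int × Nat)).length - 1)).reverse).foldl
          stepA (m, q0 :: rest2) = goA m (q0 :: rest2) := ih m
      simp only [List.length_cons, Nat.add_sub_cancel] at hrest
      rw [hrest]
      show stepA (_, p :: (goA m (q0 :: rest2)).2) 0 = _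
      simp only [stepA, goA, List.getD_cons_zero, List.getD_cons_succ, getD_zero_headD,
        List.set_cons_zero]

lemma foldl_append_if_filterMap (mem : List Int) (L : List Nat) :
    ∀ acc : List (Int × Nat),
      L.foldl (fun acc i => if mem.getD i 0 ≠ 0 then acc ++ [(mem.getD i 0, i)] else acc) acc =
        acc ++ L.filterMap (fun i => if mem.getD i 0 ≠ 0 then some (mem.getD i 0, i) else none) := by
  induction L with
  | nil => intro acc; simp
  | cons i L ih =>
    intro acc
    simp only [List.foldl_cons, List.filterMap_cons]
    by_cases h : mem.getD i 0 ≠ 0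
    · rw [if_pos h, if_pos h, ih]
      show acc ++ [(mem.getD i 0, i)] ++ _ = acc ++ ((mem.getD i 0, i) :: _)
      rw [List.append_assoc, List.singleton_append]
    · rw [if_neg h, if_neg h, ih]

lemma filterMap_range_eq_pairsOf : ∀ (mem : List Int),
    (List.range mem.length).filterMap
        (fun i => if mem.getD i 0 ≠ 0 then some (mem.getD i 0, i) else none) =
      pairsOf mem := by
  intro mem
  induction mem with
  | nil => rfl
  | cons x xs ih =>
    rw [List.length_cons, List.range_succ_eq_map, List.filterMap_cons, List.filterMap_map]
    have hfun : ((fun i => if (x :: xs).getD i 0 ≠ 0 then some ((x :: xs).getD i 0, i) else none) ∘ Nat.succ) =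
        (fun i => Option.map (fun p : Int × Nat => (p.1, p.2 + 1))
          (if xs.getD i 0 ≠ 0 then some (xs.getD i 0, i) else none)) := by
      funext i
      simp only [Function.comp, List.getD_cons_succ]
      split <;> rfl
    rw [hfun, ← List.map_filterMap, ih]
    have h0 : (if (x :: xs).getD 0 0 ≠ 0 then some ((x :: xs).getD 0 0, (0:Nat)) else none) =
        if x ≠ 0 then some (x, (0:Nat)) else none := by
      rw [List.getD_cons_zero]
    rw [h0]
    by_cases hx : x = 0
    · simp [hx, pairsOf, shiftP]
    · simp [hx, pairsOf, shiftP]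

lemma aof_eq_pairsOf (mem : List Int) :
    (List.range mem.length).foldl
        (fun acc i => if mem.getD i 0 ≠ 0 then acc ++ [(mem.getD i 0, i)] else acc)
        ([] : List (Int × Nat)) = pairsOf mem := by
  rw [foldl_append_if_filterMap, List.nil_append, filterMap_range_eq_pairsOf]

lemma goA_shift : ∀ (a : List (Int × Nat)) (m : List Int) (x : Int),
    goA (x :: m) (shiftP a) = ((x :: (goA m a).1), shiftP (goA m a).2) := by
  intro a
  induction a with
  | nil => intro m x; rfl
  | cons p rest ih =>
    intro m x
    have hcons : shiftP (p :: rest) = (p.1, p.2 + 1) :: shiftP rest := rfl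
    rw [hcons]
    show goA (x :: m) ((p.1, p.2 + 1) :: shiftP rest) = _
    simp only [goA]
    rw [ih m x]
    cases hr : (goA m rest).2 with
    | nil =>
      simp [shiftP]
    | cons q0 t =>
      have : shiftP (q0 :: t) = (q0.1, q0.2 + 1) :: shiftP t := rfl
      rw [this]
      simp only [List.headD_cons]
      by_cases hc : q0.1 < 0 ∧ p.1 < 0
      · simp only [hc, and_true, hc.1, hc.2, if_pos, ite_true, List.set_cons_succ]
        constructor <;> simp [shiftP, hc]
      · have hc2 : ¬ (q0.1 < 0 ∧ p.1 < 0) := hc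
        simp only [hc2, ite_false]
        constructor <;> simp [shiftP]

lemma eatA_shift : ∀ (xs : List Int) (c s : Int),
    eatA xs (c + s) = (c + (eatA xs s).1, (eatA xs s).2) := by
  intro xs
  induction xs with
  | nil => intro c s; rfl
  | cons x xs ih =>
    intro c s
    by_cases h1 : 0 < x
    · simp [eatA, h1]
    · by_cases h2 : x < 0
      · have : c + s + x = c + (s + x) := by ring
        simp [eatA, h1, h2, this, ih]
      · simp [eatA, h1, h2, ih]

lemma eatA_le : ∀ (xs : List Int) (s : Int), (eatA xs s).1 ≤ s := by
  intro xs
  induction xs with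
  | nil => intro s; simp [eatA]
  | cons x xs ih =>
    intro s
    by_cases h1 : 0 < x
    · simp [eatA, h1]
    · by_cases h2 : x < 0
      · simp only [eatA, h1, if_false, h2, if_true]
        exact le_trans (ih (s + x)) (by omega)
      · simp only [eatA, h1, if_false, h2]
        exact ih s

lemma shiftP_nil_iff (a : List (Int × Nat)) : shiftP a = [] ↔ a = [] := by
  cases a <;> simp [shiftP]

lemma pairs_nil_zeros : ∀ (xs : List Int), pairsOf xs = [] →
    mergeMainA xs = xs ∧ ∀ s, eatA xs s = (s, xs) := by
  intro xs
  induction xs with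
  | nil => intro _; exact ⟨rfl, fun s => rfl⟩
  | cons x xs ih =>
    intro h
    by_cases hx : x = 0
    · subst hx
      simp only [pairsOf, ne_eq, not_true_eq_false, if_neg, ite_false, shiftP_nil_iff] at h
      · obtain ⟨h1, h2⟩ := ih h
        constructor
        · simp [mergeMainA, h1]
        · intro s; simp [eatA, h2 s]
    · simp [pairsOf, hx] at h
  
lemma pairs_head_pos_eat : ∀ (xs : List Int),
    0 < ((pairsOf xs).headD (0,0)).1 → ∀ s, eatA xs s = (s, mergeMainA xs) := by
  intro xs
  induction xs with
  | nil => intro h; simp [pairsOf] at h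
  | cons x xs ih =>
    intro h s
    by_cases hx : x = 0
    · subst hx
      simp only [pairsOf, ne_eq, not_true_eq_false, if_neg, ite_false] at h
      have hP : pairsOf xs ≠ [] := by
        intro hnil; rw [hnil] at h; simp [shiftP] at h
      have hhead : ((shiftP (pairsOf xs)).headD (0,0)).1 = ((pairsOf xs).headD (0,0)).1 := by
        cases hp : pairsOf xs with
        | nil => exact absurd hp hP
        | cons a t => simp [shiftP]
      rw [hhead] at h
      simp [eatA, mergeMainA, ih h s]
    · simp only [pairsOf, ne_eq, hx, not_false_eq_true, if_true, List.headD_cons] at h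
      have hxpos : 0 < x := h
      simp [eatA, mergeMainA, hxpos, not_lt.mpr (le_of_lt hxpos)]

lemma pairs_head_neg_eat : ∀ (xs : List Int) (v : Int) (j : Nat),
    (pairsOf xs).headD (0,0) = (v, j) → v < 0 →
    (mergeMainA xs).getD j 0 < 0 ∧
      ∀ s, eatA xs s = (s + (mergeMainA xs).getD j 0, (mergeMainA xs).set j 0) := by
  intro xs
  induction xs with
  | nil =>
    intro v j h hv
    simp only [pairsOf, List.headD_nil] at h
    cases h; omega
  | cons x xs ih =>
    intro v j h hv
    by_cases hx : x = 0
    · subst hx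
      simp only [pairsOf, ne_eq, not_true_eq_false, if_neg, ite_false] at h
      cases hp : pairsOf xs with
      | nil => rw [hp] at h; simp [shiftP] at h; cases h; omega
      | cons a t =>
        rw [hp] at h
        simp only [shiftP, List.map_cons, List.headD_cons] at h
        have h1 : a.1 = v := congrArg Prod.fst h
        have h2 : a.2 + 1 = j := congrArg Prod.snd h
        have ihh := ih a.1 a.2 (by rw [hp]; rfl) (by omega)
        obtain ⟨ig, ieat⟩ := ihh
        have hj : j = a.2 + 1 := h2.symm
        subst hj
        have hmm : mergeMainA (0 :: xs) = 0 :: mergeMainA xs := by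
          simp [mergeMainA]
        rw [hmm]
        constructor
        · simpa [List.getD_cons_succ] using ig
        · intro s
          simp only [List.getD_cons_succ, List.set_cons_succ]
          simp [eatA, ieat s]
    · simp only [pairsOf, ne_eq, hx, not_false_eq_true, if_true, List.headD_cons] at h
      have h1 : x = v := congrArg Prod.fst h
      have h2 : (0:Nat) = j := congrArg Prod.snd h
      subst h1
      have hj : j = 0 := h2.symm
      subst hj
      have hxneg : x < 0 := hv
      have hmm : mergeMainA (x :: xs) = (eatA xs x).1 :: (eatA xs x).2 := by
        simp [mergeMainA, hxneg]
      rw [hmm]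
      have ht2 : (eatA xs x).1 < 0 := lt_of_le_of_lt (eatA_le xs x) hxneg
      refine ⟨by simpa using ht2, ?_⟩
      intro s
      have hsplit : s + x = s + x := rfl
      have : eatA xs (s + x) = (s + (eatA xs x).1, (eatA xs x).2) := eatA_shift xs s x
      simp only [List.getD_cons_zero, List.set_cons_zero]
      simp [eatA, hxneg, not_lt.mpr (le_of_lt hxneg), this]

-- head of the final pairs list, specified from the input alone
def hSpec (xs : List Int) : Int × Nat :=
  let h := (pairsOf xs).headD (0, 0)
  if h.1 < 0 then ((mergeMainA xs).getD h.2 0, h.2) else h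

lemma pairs_head_cases (xs : List Int) :
    pairsOf xs = [] ∨ ((pairsOf xs).headD (0,0)).1 ≠ 0 := by
  induction xs with
  | nil => exact Or.inl rfl
  | cons x xs ih =>
    by_cases hx : x = 0
    · subst hx
      simp only [pairsOf, ne_eq, not_true_eq_false, if_neg, ite_false]
      rcases ih with h | h
      · exact Or.inl (by simp [h, shiftP])
      · right
        cases hp : pairsOf xs with
        | nil => rw [hp] at h; simp at h
        | cons a t => rw [hp] at h; simpa [shiftP] using h
    · exact Or.inr (by simp [pairsOf, hx])

lemma A_main : ∀ (xs : List Int),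
    (goA xs (pairsOf xs)).1 = mergeMainA xs ∧
      (goA xs (pairsOf xs)).2.headD (0,0) = hSpec xs := by
  intro xs
  induction xs with
  | nil => exact ⟨rfl, rfl⟩
  | cons x xs ih =>
    obtain ⟨ihm, ihh⟩ := ih
    by_cases hx : x = 0
    · subst hx
      have hpairs : pairsOf ((0:Int) :: xs) = shiftP (pairsOf xs) := by simp [pairsOf]
      have hmm : mergeMainA ((0:Int) :: xs) = 0 :: mergeMainA xs := by simp [mergeMainA]
      rw [hpairs, goA_shift, hmm]
      refine ⟨by rw [ihm], ?_⟩
      rcases pairs_head_cases xs with hP | hP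
      · -- pairsOf xs = [], hence final pairs empty on both sides
        have hA : (goA xs (pairsOf xs)).2 = [] := by rw [hP]; rfl
        simp [hA, shiftP, hSpec, hpairs, hP, goA]
      · -- pairsOf xs nonempty, final pairs nonempty
        have hPne : pairsOf xs ≠ [] := by
          intro hnil; rw [hnil] at hP; simp at hP
        have hAne : (goA xs (pairsOf xs)).2 ≠ [] := by
          cases hp : pairsOf xs with
          | nil => exact absurd hp hPne
          | cons a t =>
            simp only [goA]
            split <;> simp
        cases hga : (goA xs (pairsOf xs)).2 with
        | nil => exact absurd hga hAne
        | cons b t =>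
          rw [hga] at ihh
          simp only [List.headD_cons] at ihh
          cases hp : pairsOf xs with
          | nil => exact absurd hp hPne
          | cons a t2 =>
            simp only [shiftP, List.map_cons, List.headD_cons]
            rw [hp] at hP
            simp only [List.headD_cons] at hP
            simp only [hSpec, hpairs, hp, shiftP, List.map_cons, List.headD_cons]
            by_cases hneg : a.1 < 0
            · simp only [hSpec, hp, List.headD_cons, hneg, if_true] at ihh
              simp only [hneg, if_true]
              rw [ihh, hmm]
              simp
            · simp only [hSpec, hp, List.headD_cons, hneg, if_false] at ihh
              simp only [hneg, if_false]
              rw [ihh]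
    · -- x ≠ 0
      have hpairs : pairsOf (x :: xs) = (x, 0) :: shiftP (pairsOf xs) := by
        simp [pairsOf, hx]
      rw [hpairs]
      simp only [goA]
      rw [goA_shift]
      set M := (goA xs (pairsOf xs)).1 with hM
      set A := (goA xs (pairsOf xs)).2 with hA
      by_cases hxneg : x < 0
      · -- x negative: merge iff head of final tail pairs negative
        rcases pairs_head_cases xs with hP | hP
        · -- all of xs zero
          have hAnil : A = [] := by rw [hA, hP]; rfl
          obtain ⟨hm0, heat0⟩ := pairs_nil_zeros xs hP
          have hmm : mergeMainA (x :: xs) = x :: xs := by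
            simp [mergeMainA, hxneg, heat0 x]
          simp only [hAnil, shiftP, List.map_nil, List.headD_nil]
          have hcond : ¬ ((0:Int) < 0 ∧ x < 0) := by omega
          simp only [hcond, if_false]
          refine ⟨by rw [ihm, hm0, hmm], ?_⟩
          simp [hSpec, hpairs, hmm, hxneg]
        · have hPne : pairsOf xs ≠ [] := by
            intro hnil; rw [hnil] at hP; simp at hP
          have hAne : A ≠ [] := by
            rw [hA]
            cases hp : pairsOf xs with
            | nil => exact absurd hp hPne
            | cons a t => simp only [goA]; split <;> simp
          cases hga : A with
          | nil => exact absurd hga hAne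
          | cons b t =>
            rw [hga] at ihh
            simp only [List.headD_cons] at ihh
            simp only [shiftP, List.map_cons, List.headD_cons]
            cases hp : pairsOf xs with
            | nil => exact absurd hp hPne
            | cons a t2 =>
              rw [hp] at hP
              simp only [List.headD_cons] at hP
              by_cases hneg : a.1 < 0
              · -- merge fires
                obtain ⟨hg, heat⟩ := pairs_head_neg_eat xs a.1 a.2 (by rw [hp]; rfl) hneg
                simp only [hSpec, hp, List.headD_cons, hneg, if_true] at ihh
                have hb1 : b.1 = (mergeMainA xs).getD a.2 0 := by rw [ihh]
                have hb2 : b.2 = a.2 := by rw [ihh]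
                have hcond : b.1 < 0 ∧ x < 0 := ⟨hb1 ▸ hg, hxneg⟩
                simp only [hcond, and_true, hb1 ▸ hg, if_true]
                have hmm : mergeMainA (x :: xs) = (eatA xs x).1 :: (eatA xs x).2 := by
                  simp [mergeMainA, hxneg]
                have heatx := heat x
                constructor
                · rw [hmm, heatx]
                  simp only [List.set_cons_zero, List.set_cons_succ, hb2, hb1]
                  rw [ihm]
                · simp only [hSpec, hpairs, List.headD_cons, hxneg, if_true, hmm, heatx]
                  simp [hb1]
              · -- head positive: no merge
                have hpos : 0 < a.1 := by
                  rcases lt_trichotomy a.1 0 with h | h | h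
                  · exact absurd h hneg
                  · exact absurd h hP
                  · exact h
                simp only [hSpec, hp, List.headD_cons, hneg, if_false] at ihh
                have hb1 : b.1 = a.1 := by rw [ihh]
                have hcond : ¬ (b.1 < 0 ∧ x < 0) := by
                  rw [hb1]; omega
                simp only [hcond, if_false]
                have heat := pairs_head_pos_eat xs (by rw [hp]; simpa using hpos) x
                have hmm : mergeMainA (x :: xs) = x :: mergeMainA xs := by
                  simp [mergeMainA, hxneg, heat]
                refine ⟨by rw [ihm, hmm], ?_⟩
                simp [hSpec, hpairs, hxneg, hmm]
      · -- x positive: never merges (condition needs x < 0)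
        have hcond : ∀ q : Int × Nat, ¬ (q.1 < 0 ∧ x < 0) := by
          intro q hq; exact hxneg hq.2
        simp only [hcond, if_false]
        have hmm : mergeMainA (x :: xs) = x :: mergeMainA xs := by
          simp [mergeMainA, hxneg]
        refine ⟨by rw [ihm, hmm], ?_⟩
        simp [hSpec, hpairs, hxneg]

lemma Combine_Mem_eq_mergeMainA (mem : List Int) : Combine_Mem mem = mergeMainA mem := by
  unfold Combine_Mem
  rw [aof_eq_pairsOf]
  show (List.foldl stepA (mem, pairsOf mem) (List.range ((pairsOf mem).length - 1)).reverse).1 =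
    mergeMainA mem
  rw [loop_eq_goA]
  exact (A_main mem).1

-- ------ B side ------

lemma replicate_succ_shuffle (k : Nat) (R : List Int) :
    List.replicate (k + 1) (0:Int) ++ R = List.replicate k 0 ++ 0 :: R := by
  rw [List.replicate_succ', List.append_assoc, List.singleton_append]

lemma B_joint : ∀ (xs : List Int),
    (∀ out, finalizeB (xs.foldl stepB (out, none)) = out ++ mergeMainA xs) ∧
    (∀ out s k, finalizeB (xs.foldl stepB (out, some (s, k))) =
        out ++ (eatA xs s).1 :: (List.replicate k 0 ++ (eatA xs s).2)) := by
  intro xs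
  induction xs with
  | nil =>
    constructor
    · intro out; simp [finalizeB, mergeMainA]
    · intro out s k; simp [finalizeB, eatA]
  | cons x xs ih =>
    obtain ⟨ih1, ih2⟩ := ih
    constructor
    · intro out
      by_cases hx : x < 0
      · have hstep : stepB (out, none) x = (out, some (x, 0)) := by simp [stepB, hx]
        simp only [List.foldl_cons, hstep, ih2 out x 0]
        simp [mergeMainA, hx]
      · have hstep : stepB (out, none) x = (out ++ [x], none) := by simp [stepB, hx]
        simp only [List.foldl_cons, hstep, ih1 (out ++ [x])]
        have hmm : mergeMainA (x :: xs) = x :: mergeMainA xs := by simp [mergeMainA, hx]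
        simp [hmm]
    · intro out s k
      by_cases hx : x < 0
      · have hstep : stepB (out, some (s, k)) x = (out, some (s + x, k + 1)) := by
          simp [stepB, hx]
        simp only [List.foldl_cons, hstep, ih2 out (s + x) (k + 1)]
        have heat : eatA (x :: xs) s = ((eatA xs (s + x)).1, 0 :: (eatA xs (s + x)).2) := by
          simp [eatA, hx, not_lt.mpr (le_of_lt hx)]
        rw [heat, replicate_succ_shuffle]
      · by_cases hx0 : x = 0
        · subst hx0
          have hstep : stepB (out, some (s, k)) (0:Int) = (out, some (s, k + 1)) := by
            simp [stepB]
          simp only [List.foldl_cons, hstep, ih2 out s (k + 1)]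
          have heat : eatA ((0:Int) :: xs) s = ((eatA xs s).1, 0 :: (eatA xs s).2) := by
            simp [eatA]
          rw [heat, replicate_succ_shuffle]
        · have hxpos : 0 < x := by omega
          have hstep : stepB (out, some (s, k)) x =
              (out ++ [s] ++ List.replicate k 0 ++ [x], none) := by
            simp [stepB, hx, hx0]
          simp only [List.foldl_cons, hstep, ih1 (out ++ [s] ++ List.replicate k 0 ++ [x])]
          have heat : eatA (x :: xs) s = (s, x :: mergeMainA xs) := by
            simp [eatA, hxpos]
          rw [heat]
          simp [List.append_assoc]

lemma Combine_Mem_alt_eq_mergeMainA (mem : List Int) : Combine_Mem_alt mem = mergeMainA mem := by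
  unfold Combine_Mem_alt
  have h := (B_joint mem).1 []
  unfold finalizeB at h
  simpa using h

-- ===== VERDICT (by name: the statement is the Claim_ definition above) =====
theorem Combine_Mem_spec : Claim_equal_Combine_Mem := by
  intro mem _
  unfold Spec_Combine_Mem
  rw [Combine_Mem_eq_mergeMainA, Combine_Mem_alt_eq_mergeMainA]
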